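-- pv_equiv track=rewrite | github.com/austinprete/BioinformaticsAlgorithms | chapter_1/ba1m.py | number_to_pattern
-- ===== SOURCE A (Python) =====
-- NUMBER_TO_LETTER = {0: 'A', 1: 'C', 2: 'G', 3: 'T'}
--
-- def number_to_pattern(index, k):
--     if k == 1:
--         return NUMBER_TO_LETTER[index]
--
--     prefix_index = int(index / 4)
--     remainder = index % 4
--
--     letter = NUMBER_TO_LETTER[remainder]
--
--     prefix_pattern = number_to_pattern(prefix_index, k - 1)
--
--     return prefix_pattern + letter
-- ===== SOURCE B (Python) =====
-- NUMBER_TO_LETTER = {0: 'A', 1: 'C', 2: 'G', 3: 'T'}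
--
--
-- def number_to_pattern(index, k):
--     letters = []
--     for _ in range(k - 1):
--         letters.append(NUMBER_TO_LETTER[index % 4])
--         index = int(index / 4)
--     letters.append(NUMBER_TO_LETTER[index])
--     return ''.join(reversed(letters))
-- ===== Notes on version B (the rewrite author's own statement) =====
-- stated objective: simpler
-- what changed: Replaces the k-deep recursion (building the string most-significant-last via recursive calls) with a single iterative loop that extracts base-4 digits into a list and joins them reversed; no recursion, O(1) call depth.
import Mathlib
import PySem

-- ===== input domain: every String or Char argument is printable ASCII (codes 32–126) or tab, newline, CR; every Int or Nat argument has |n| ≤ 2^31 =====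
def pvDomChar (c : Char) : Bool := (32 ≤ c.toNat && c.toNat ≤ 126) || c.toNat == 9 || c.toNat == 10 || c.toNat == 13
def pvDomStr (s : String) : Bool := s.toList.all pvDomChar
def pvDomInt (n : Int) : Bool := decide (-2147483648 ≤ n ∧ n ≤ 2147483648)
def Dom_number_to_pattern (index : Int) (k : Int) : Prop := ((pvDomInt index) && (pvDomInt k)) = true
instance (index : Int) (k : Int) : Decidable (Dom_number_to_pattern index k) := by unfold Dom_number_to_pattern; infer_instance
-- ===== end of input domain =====

-- B replaces A's k-deep recursion by one iterative digit-extraction loop joined in reverse (objective: simpler).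

-- NUMBER_TO_LETTER = {0: 'A', 1: 'C', 2: 'G', 3: 'T'}; lookup raises KeyError outside 0..3
-- (excluded by Pre_), so the port's .getD "" default is never reached on admitted inputs.
def NUMBER_TO_LETTER : PySem.Dict Int String :=
  PySem.Dict.ofList [(0, "A"), (1, "C"), (2, "G"), (3, "T")]

def pvLetter (i : Int) : String := (NUMBER_TO_LETTER.get? i).getD ""

-- ===== PORT A =====
-- recursion on the fuel k.toNat; Python diverges (RecursionError) for k ≤ 0, which Pre_ excludes,
-- so the fuel-0 branch is never reached on admitted inputs.
-- int(index / 4) is exact float division truncated toward zero for |index| ≤ 2^31 = PySem.Int.truncdiv.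
def pvA (index : Int) : Nat → String
  | 0 => ""
  | 1 => pvLetter index
  | (n + 2) =>
      pvA (PySem.Int.truncdiv index 4) (n + 1) ++ pvLetter (PySem.Int.mod index 4)

def number_to_pattern (index : Int) (k : Int) : String := pvA index k.toNat

-- ===== PORT B =====
def number_to_pattern_alt (index : Int) (k : Int) : String :=
  let st := (List.range (k - 1).toNat).foldl
    (fun (p : List String × Int) (_ : Nat) =>
      (p.1 ++ [pvLetter (PySem.Int.mod p.2 4)], PySem.Int.truncdiv p.2 4)) ([], index)
  let letters := st.1 ++ [pvLetter st.2]
  PySem.Str.join "" letters.reverse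

-- ===== PRECONDITION & SPEC =====
-- floor of log base 4 (fuel-bounded structural recursion so literals kernel-evaluate in O(log n))
def pvLog4Aux : Nat → Nat → Nat
  | 0, _ => 0
  | (fuel + 1), n => if n < 4 then 0 else pvLog4Aux fuel (n / 4) + 1

def pvLog4 (n : Nat) : Nat := pvLog4Aux n n

-- Exactly the inputs on which Python A returns normally: k ≥ 1 and -4^(k-1) < index < 4^k,
-- stated via the base-4 logarithm so it evaluates without computing 4^k; outside these bounds
-- the final dict lookup raises KeyError, and for k ≤ 0 A infinite-recurses (RecursionError).
-- No other inputs are excluded.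
def Pre_number_to_pattern (index : Int) (k : Int) : Prop :=
  1 ≤ k ∧ (if index < 0 then pvLog4 index.natAbs < (k - 1).toNat
           else index = 0 ∨ pvLog4 index.natAbs < k.toNat)
instance (index : Int) (k : Int) : Decidable (Pre_number_to_pattern index k) := by
  unfold Pre_number_to_pattern; infer_instance

def pvWitness_number_to_pattern : Int × Int := (11, 2)

def Spec_number_to_pattern (index : Int) (k : Int) (out : String) : Prop := out = number_to_pattern_alt index k
instance (index : Int) (k : Int) (out : String) : Decidable (Spec_number_to_pattern index k out) := by unfold Spec_number_to_pattern; infer_instance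

-- ===== CLAIM (what is proved, stated in full; the proofs are below) =====
def Claim_equal_number_to_pattern : Prop := ∀ (index : Int) (k : Int), Dom_number_to_pattern index k → Pre_number_to_pattern index k → Spec_number_to_pattern index k (number_to_pattern index k)

-- ===== LEMMAS AND PROOFS =====

-- B's loop body, as a function of the state only (the range element is ignored).
def pvStep (p : List String × Int) : List String × Int :=
  (p.1 ++ [pvLetter (PySem.Int.mod p.2 4)], PySem.Int.truncdiv p.2 4)

theorem pv_foldl_const {α β : Type} (g : β → β) :
    ∀ (l : List α) (s : β), l.foldl (fun p _ => g p) s = g^[l.length] s := by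
  intro l
  induction l with
  | nil => intro s; rfl
  | cons h t ih =>
      intro s
      simp [List.foldl, ih, Function.iterate_succ_apply]

theorem pvStep_iter_snd (n : Nat) : ∀ (ls : List String) (i : Int),
    (pvStep^[n] (ls, i)).2 = (pvStep^[n] ([], i)).2 := by
  induction n with
  | zero => intro ls i; rfl
  | succ m ih =>
      intro ls i
      simp only [Function.iterate_succ_apply, pvStep]
      rw [ih (ls ++ [pvLetter (PySem.Int.mod i 4)]), ih ([] ++ [pvLetter (PySem.Int.mod i 4)])]

theorem pvStep_iter_fst (n : Nat) : ∀ (ls : List String) (i : Int),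
    (pvStep^[n] (ls, i)).1 = ls ++ (pvStep^[n] ([], i)).1 := by
  induction n with
  | zero => intro ls i; simp
  | succ m ih =>
      intro ls i
      simp only [Function.iterate_succ_apply, pvStep]
      rw [ih (ls ++ [pvLetter (PySem.Int.mod i 4)]), ih ([] ++ [pvLetter (PySem.Int.mod i 4)])]
      simp

theorem pv_intercalate_nil (xs : List (List Char)) :
    List.intercalate ([] : List Char) xs = xs.flatten := by
  induction xs with
  | nil => simp [List.intercalate, List.intersperse]
  | cons h t ih =>
      cases t with
      | nil => simp [List.intercalate, List.intersperse]
      | cons a b =>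
          simp only [List.intercalate, List.intersperse] at *
          simp_all [List.flatten]

theorem pv_join_snoc (l : List String) (s : String) :
    PySem.Str.join "" (l ++ [s]) = PySem.Str.join "" l ++ s := by
  simp [PySem.Str.join, PySem.Chars.join, pv_intercalate_nil]

theorem pv_join_single (s : String) : PySem.Str.join "" [s] = s := by
  simp [PySem.Str.join, PySem.Chars.join, pv_intercalate_nil]

theorem pvA_eq_iter (n : Nat) : ∀ (i : Int),
    pvA i (n + 1) =
      PySem.Str.join "" (((pvStep^[n] ([], i)).1 ++ [pvLetter (pvStep^[n] ([], i)).2]).reverse) := by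
  induction n with
  | zero =>
      intro i
      simp [pvA, pv_join_single]
  | succ m ih =>
      intro i
      have hstep : pvStep^[m + 1] (([] : List String), i)
          = pvStep^[m] ([pvLetter (PySem.Int.mod i 4)], PySem.Int.truncdiv i 4) := by
        rw [Function.iterate_succ_apply]; rfl
      have hfst := pvStep_iter_fst m [pvLetter (PySem.Int.mod i 4)] (PySem.Int.truncdiv i 4)
      have hsnd := pvStep_iter_snd m [pvLetter (PySem.Int.mod i 4)] (PySem.Int.truncdiv i 4)
      show pvA (PySem.Int.truncdiv i 4) (m + 1) ++ pvLetter (PySem.Int.mod i 4) = _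
      rw [hstep, hfst, hsnd, List.append_assoc, List.singleton_append,
        List.reverse_cons, pv_join_snoc, ih]

-- ===== VERDICT (by name: the statement is the Claim_ definition above) =====
theorem number_to_pattern_spec : Claim_equal_number_to_pattern := by
  intro index k _hdom hpre
  obtain ⟨hk, -⟩ := hpre
  unfold Spec_number_to_pattern number_to_pattern number_to_pattern_alt
  have hfold : (List.range (k - 1).toNat).foldl
      (fun (p : List String × Int) (_ : Nat) =>
        (p.1 ++ [pvLetter (PySem.Int.mod p.2 4)], PySem.Int.truncdiv p.2 4)) ([], index)
      = pvStep^[(k - 1).toNat] ([], index) := by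
    simpa [pvStep] using pv_foldl_const pvStep (List.range (k - 1).toNat) (([] : List String), index)
  have hk' : k.toNat = (k - 1).toNat + 1 := by omega
  simp only [hfold, hk']
  exact pvA_eq_iter (k - 1).toNat index
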